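-- pv_equiv track=rewrite | github.com/SpicyLemon/SpicyLemon | advent_of_code/2022/day-23a/day-23a.py | grid_str_with_edges
-- ===== SOURCE A (Python) =====
-- def get_dimensions(grid):
--     rv = Point(0, len(grid))
--     for y in range(0, rv.y):
--         if len(grid[y]) > rv.x:
--             rv.x = len(grid[y])
--     return rv
--
-- def grid_str_with_edges(grid) -> str:
--     dims = get_dimensions(grid)
--     height = dims.y
--     width = dims.x
--     for y in range(0, height):
--         if len(grid[y]) > width:
--             width = len(grid[y])
--     header_lines = grid_header_lines(width)
--     lines = []
--     lines.extend(header_lines)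
--     for y in range(0, height):
--         new_line = ''.join(grid[y]) + (' ' * (width - len(grid[y])))
--         lines.append(f'{y:>3}{new_line}{y}')
--     lines.extend(reversed(header_lines))
--     return '\n'.join(lines)
--
-- def grid_header_lines(width):
--     lines = []
--     if width > 100:
--         lines.append(' ' * 100)
--         for i in range(1, 10):
--             lines[-1] += str(i) * 100
--             if len(lines[-1]) >= width:
--                 lines[-1] = lines[-1][:width]
--                 break
--     if width > 10:
--         lines.append(' ' * 10)
--         skip_zero = True
--         while True:
--             for i in range(0,10):
--                 if skip_zero and i == 0:
--                     skip_zero = False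
--                     continue
--                 lines[-1] += str(i) * 10
--             if len(lines[-1]) >= width:
--                 lines[-1] = lines[-1][:width]
--                 break
--     lines.append('')
--     while True:
--         for i in range(0, 10):
--             lines[-1] += str(i)
--         if len(lines[-1]) >= width:
--             lines[-1] = lines[-1][:width]
--             break
--     lead = ' ' * 3
--     for i in range(0, len(lines)):
--         lines[i] = lead + lines[i]
--     return lines
--
-- class Point(object):
--     '''A Point is a thing with an x and y value.'''
--     def __init__(self, x=0, y=0, n=None):
--         '''Constructor for a Point that optionally accepts the x and y values.'''
--         self.x = x
--         self.y = y
--         self.z = None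
--         self.n = n
--     def __str__(self) -> str:
--         '''Get a string representation of this Point.'''
--         if self.n == None:
--             return f'({self.x},{self.y})'
--         return f'{self.n}({self.x},{self.y})'
--     def distance_to(self, p2) -> int:
--         '''Calculates the Manhattan distance between this point and another.'''
--         return distance(self, p2)
-- ===== SOURCE B (Python) =====
-- def grid_str_with_edges(grid) -> str:
--     width = max((len(row) for row in grid), default=0)
--     lead = ' ' * 3
--     headers = []
--     if width > 100:
--         headers.append(lead + ''.join(' ' if x < 100 else str(x // 100)
--                                       for x in range(min(width, 1000))))
--     if width > 10:
--         headers.append(lead + ''.join(' ' if x < 10 else str(x // 10 % 10)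
--                                       for x in range(width)))
--     headers.append(lead + ''.join(str(x % 10) for x in range(width)))
--     body = [f'{y:>3}' + ''.join(row) + ' ' * (width - len(row)) + str(y)
--             for y, row in enumerate(grid)]
--     return '\n'.join(headers + body + headers[::-1])
-- ===== Notes on version B (the rewrite author's own statement) =====
-- stated objective: simpler
-- what changed: Header ruler lines are computed per column with closed-form digit arithmetic (units x%10, tens x//10%10, hundreds x//100 over range(min(width,1000))) in one comprehension each, instead of A's repeat-a-chunk-then-truncate while/for loops with a skip-zero flag; width is a single max(...,default=0) and body rows a single enumerate comprehension.
import Mathlib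
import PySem

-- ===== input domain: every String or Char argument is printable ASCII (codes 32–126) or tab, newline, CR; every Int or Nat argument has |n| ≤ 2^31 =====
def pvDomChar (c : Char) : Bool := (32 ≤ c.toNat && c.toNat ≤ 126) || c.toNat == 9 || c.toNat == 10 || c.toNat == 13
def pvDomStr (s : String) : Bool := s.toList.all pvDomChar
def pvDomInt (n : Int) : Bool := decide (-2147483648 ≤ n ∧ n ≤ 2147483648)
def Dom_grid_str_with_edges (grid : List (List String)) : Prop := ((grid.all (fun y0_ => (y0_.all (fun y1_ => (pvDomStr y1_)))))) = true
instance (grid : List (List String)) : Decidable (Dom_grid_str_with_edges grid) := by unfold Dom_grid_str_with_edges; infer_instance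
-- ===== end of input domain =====

-- B re-implements the ruler header lines as a per-column closed form (one map over the
-- column indices) instead of A's repeat-chunks-then-truncate loops; same return value.

-- ===== PORT A =====
-- str(i) for a single decimal digit i ≤ 9 (exact there)
def pvDigit (i : Nat) : Char := Char.ofNat (48 + i)

-- the f-string f'{y:>3}{"".join(row)}{padding}{y}' both Pythons build for a body row;
-- ''.join of the row's cells is ported as flatten of the cells' char lists (exact)
def pvRowLine (width : Nat) (y : Int) (row : List String) : List Char :=
  let d := PySem.Int.toChars y
  (List.replicate (3 - d.length) ' ' ++ d)
    ++ (row.map String.toList).flatten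
    ++ List.replicate (width - row.length) ' '
    ++ d

-- get_dimensions(grid): Point with y = len(grid) and x = running max of row lengths,
-- ported as the (x, y) pair (only .x/.y of the Point are ever read)
def pvGetDimensions (grid : List (List String)) : Nat × Nat :=
  let x := (PySem.List.pyRange 0 (grid.length : Int) 1).foldl
    (fun x i => if x < (PySem.List.pyGetD grid i []).length
                then (PySem.List.pyGetD grid i []).length else x) 0
  (x, grid.length)

-- str(i) * 100 appended per iteration of the hundreds for-loop
def pvHundredsChunk (i : Nat) : List Char := List.replicate 100 (pvDigit i)

-- the 'for i in range(1, 10): … break' loop of the hundreds header line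
def pvHundredsLoop (width : Nat) : List Nat → List Char → List Char
  | [], s => s
  | i :: rest, s =>
    if width ≤ (s ++ pvHundredsChunk i).length then (s ++ pvHundredsChunk i).take width
    else pvHundredsLoop width rest (s ++ pvHundredsChunk i)

-- one pass of the tens while-loop body (skip_zero on the first pass)
def pvTensChunk (skipZero : Bool) : List Char :=
  (if skipZero then List.range' 1 9 else List.range 10).flatMap
    (fun i => List.replicate 10 (pvDigit i))

-- the 'while True: … break' loop of the tens header line
def pvTensLoop (width : Nat) (s : List Char) (skipZero : Bool) : List Char :=
  if width ≤ (s ++ pvTensChunk skipZero).length then (s ++ pvTensChunk skipZero).take width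
  else pvTensLoop width (s ++ pvTensChunk skipZero) false
termination_by width - s.length
decreasing_by
  have h0 : 0 < (pvTensChunk skipZero).length := by cases skipZero <;> decide
  simp only [List.length_append] at *
  omega

-- one pass of the units while-loop body: '0123456789'
def pvUnitsChunk : List Char := (List.range 10).map pvDigit

-- the 'while True: … break' loop of the units header line
def pvUnitsLoop (width : Nat) (s : List Char) : List Char :=
  if width ≤ (s ++ pvUnitsChunk).length then (s ++ pvUnitsChunk).take width
  else pvUnitsLoop width (s ++ pvUnitsChunk)
termination_by width - s.length
decreasing_by
  have h0 : (0:Nat) < pvUnitsChunk.length := by decide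
  simp only [List.length_append] at *
  omega

-- grid_header_lines(width): conditional hundreds/tens lines, units line, 3-space lead
def pvHeaderLines (width : Nat) : List (List Char) :=
  ((if 100 < width then
      [pvHundredsLoop width [1, 2, 3, 4, 5, 6, 7, 8, 9] (List.replicate 100 ' ')] else [])
    ++ (if 10 < width then [pvTensLoop width (List.replicate 10 ' ') true] else [])
    ++ [pvUnitsLoop width []]).map (fun l => List.replicate 3 ' ' ++ l)

-- grid_str_with_edges(grid); '\n'.join ported as intercalate over char lists (exact)
def grid_str_with_edges (grid : List (List String)) : String :=
  let dims := pvGetDimensions grid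
  let height := dims.2
  let width := (PySem.List.pyRange 0 (height : Int) 1).foldl
    (fun w i => if w < (PySem.List.pyGetD grid i []).length
                then (PySem.List.pyGetD grid i []).length else w) dims.1
  let headerLines := pvHeaderLines width
  let lines := (PySem.List.pyRange 0 (height : Int) 1).foldl
    (fun acc y => acc ++ [pvRowLine width y (PySem.List.pyGetD grid y [])]) headerLines
  String.ofList (List.intercalate ['\n'] (lines ++ headerLines.reverse))

-- ===== PORT B =====
-- width = max((len(row) for row in grid), default=0); each header line is one map over
-- the column indices emitting that column's digit; body rows via enumerate
def grid_str_with_edges_alt (grid : List (List String)) : String :=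
  let width := PySem.List.maxD (grid.map List.length) (fun x => x) 0
  let lead := List.replicate 3 ' '
  let headers :=
    (if 100 < width then
       [lead ++ (List.range (min width 1000)).map
          (fun x => if x < 100 then ' ' else pvDigit (x / 100))] else [])
    ++ (if 10 < width then
       [lead ++ (List.range width).map
          (fun x => if x < 10 then ' ' else pvDigit (x / 10 % 10))] else [])
    ++ [lead ++ (List.range width).map (fun x => pvDigit (x % 10))]
  let body := (PySem.List.enumerate grid).map (fun p => pvRowLine width p.1 p.2)
  String.ofList (List.intercalate ['\n'] (headers ++ body ++ headers.reverse))

-- ===== PRECONDITION & SPEC =====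
def Spec_grid_str_with_edges (grid : List (List String)) (out : String) : Prop := out = grid_str_with_edges_alt grid
instance (grid : List (List String)) (out : String) : Decidable (Spec_grid_str_with_edges grid out) := by unfold Spec_grid_str_with_edges; infer_instance

-- ===== CLAIM (what is proved, stated in full; the proofs are below) =====
def Claim_equal_grid_str_with_edges : Prop := ∀ (grid : List (List String)), Dom_grid_str_with_edges grid → Spec_grid_str_with_edges grid (grid_str_with_edges grid)

-- ===== LEMMAS AND PROOFS =====

-- a fold of max over values all ≤ the accumulator leaves the accumulator unchanged
lemma pv_foldl_max_fixed (xs : List (List String)) (a : Nat)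
    (h : ∀ r ∈ xs, r.length ≤ a) :
    xs.foldl (fun m r => max m r.length) a = a := by
  induction xs generalizing a with
  | nil => rfl
  | cons x t ih =>
    simp only [List.foldl_cons]
    have hx : max a x.length = a := by
      have := h x (by simp); omega
    rw [hx]
    exact ih a (fun r hr => h r (by simp [hr]))

-- the if-form running max A uses is the max-form fold
lemma pv_if_max_eq :
    (fun (m : Nat) (r : List String) => if m < r.length then r.length else m)
      = (fun m r => max m r.length) := by
  funext m r
  by_cases h : m < r.length <;> simp [h] <;> omega

-- B's max(…, default=0) equals the running-max fold
lemma pv_maxD_eq (grid : List (List String)) :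
    PySem.List.maxD (grid.map List.length) (fun x => x) 0
      = grid.foldl (fun m r => max m r.length) 0 := by
  cases grid with
  | nil => rfl
  | cons r t =>
    simp only [List.map_cons, PySem.List.maxD, PySem.List.max?_id_cons, Option.getD_some]
    simp [List.foldl_map]

-- the units chunk extends the column-wise prefix by ten more columns
lemma pvUnits_step (m : Nat) :
    (List.range (10 * m)).map (fun x => pvDigit (x % 10)) ++ pvUnitsChunk
      = (List.range (10 * m + 10)).map (fun x => pvDigit (x % 10)) := by
  rw [List.range_add, List.map_append]
  congr 1
  rw [List.map_map]
  apply List.map_congr_left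
  intro j hj
  simp only [List.mem_range] at hj
  simp only [Function.comp]
  congr 1
  omega

lemma pvUnitsLoop_eq (width m : Nat) :
    pvUnitsLoop width ((List.range (10 * m)).map (fun x => pvDigit (x % 10)))
      = (List.range width).map (fun x => pvDigit (x % 10)) := by
  rw [pvUnitsLoop, pvUnits_step]
  split
  · next h =>
    simp only [List.length_map, List.length_range] at h
    rw [← List.map_take, List.take_range, Nat.min_eq_left h]
  · next h =>
    simp only [List.length_map, List.length_range] at h
    have hrec := pvUnitsLoop_eq width (m + 1)
    have h10 : 10 * (m + 1) = 10 * m + 10 := by ring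
    rw [h10] at hrec
    exact hrec
termination_by width - 10 * m
decreasing_by simp only [List.length_map, List.length_range] at *; omega

-- first pass of the tens loop produces the first hundred columns
lemma pvTens_first :
    List.replicate 10 ' ' ++ pvTensChunk true
      = (List.range 100).map (fun x => if x < 10 then ' ' else pvDigit (x / 10 % 10)) := by
  decide

lemma pvTens_chunk_false :
    pvTensChunk false = (List.range 100).map (fun j => pvDigit (j / 10)) := by
  decide

lemma pvTens_step (m : Nat) (hm : 1 ≤ m) :
    (List.range (100 * m)).map (fun x => if x < 10 then ' ' else pvDigit (x / 10 % 10))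
        ++ pvTensChunk false
      = (List.range (100 * m + 100)).map
          (fun x => if x < 10 then ' ' else pvDigit (x / 10 % 10)) := by
  rw [List.range_add, List.map_append]
  congr 1
  rw [pvTens_chunk_false, List.map_map]
  apply List.map_congr_left
  intro j hj
  simp only [List.mem_range] at hj
  simp only [Function.comp]
  have h1 : ¬ (100 * m + j < 10) := by omega
  rw [if_neg h1]
  congr 1
  omega

lemma pvTensLoop_eq (width m : Nat) (hm : 1 ≤ m) :
    pvTensLoop width
        ((List.range (100 * m)).map (fun x => if x < 10 then ' ' else pvDigit (x / 10 % 10)))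
        false
      = (List.range width).map (fun x => if x < 10 then ' ' else pvDigit (x / 10 % 10)) := by
  rw [pvTensLoop, pvTens_step m hm]
  split
  · next h =>
    simp only [List.length_map, List.length_range] at h
    rw [← List.map_take, List.take_range, Nat.min_eq_left h]
  · next h =>
    simp only [List.length_map, List.length_range] at h
    have hrec := pvTensLoop_eq width (m + 1) (by omega)
    have h100 : 100 * (m + 1) = 100 * m + 100 := by ring
    rw [h100] at hrec
    exact hrec
termination_by width - 100 * m
decreasing_by simp only [List.length_map, List.length_range] at *; omega

lemma pvTensEntry (width : Nat) :
    pvTensLoop width (List.replicate 10 ' ') true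
      = (List.range width).map (fun x => if x < 10 then ' ' else pvDigit (x / 10 % 10)) := by
  rw [pvTensLoop, pvTens_first]
  split
  · next h =>
    simp only [List.length_map, List.length_range] at h
    rw [← List.map_take, List.take_range, Nat.min_eq_left h]
  · next h =>
    simpa using pvTensLoop_eq width 1 (le_refl 1)

-- processed hundreds prefix after digits 1..i-1, column-wise
lemma pvHundreds_step (i : Nat) (h1 : 1 ≤ i) (h9 : i ≤ 9) :
    (List.range (100 * i)).map (fun x => if x < 100 then ' ' else pvDigit (x / 100))
        ++ pvHundredsChunk i
      = (List.range (100 * i + 100)).map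
          (fun x => if x < 100 then ' ' else pvDigit (x / 100)) := by
  rw [List.range_add, List.map_append]
  congr 1
  have hrep : pvHundredsChunk i = (List.range 100).map (fun _ => pvDigit i) := by
    rw [List.map_const', List.length_range]; rfl
  rw [hrep, List.map_map]
  apply List.map_congr_left
  intro j hj
  simp only [List.mem_range] at hj
  simp only [Function.comp]
  have hge : ¬ (100 * i + j < 100) := by omega
  rw [if_neg hge]
  congr 1
  omega

lemma pvHundredsLoop_eq (width i : Nat) (h1 : 1 ≤ i) (h9 : i ≤ 9) :
    pvHundredsLoop width (List.range' i (10 - i))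
        ((List.range (100 * i)).map (fun x => if x < 100 then ' ' else pvDigit (x / 100)))
      = (List.range (min width 1000)).map
          (fun x => if x < 100 then ' ' else pvDigit (x / 100)) := by
  have hcons : List.range' i (10 - i) = i :: List.range' (i + 1) (10 - (i + 1)) := by
    have h : 10 - i = (10 - (i + 1)) + 1 := by omega
    rw [h, List.range'_succ]
  rw [hcons, pvHundredsLoop, pvHundreds_step i h1 h9]
  split
  · next h =>
    simp only [List.length_map, List.length_range] at h
    rw [← List.map_take, List.take_range]
    have e1 : min width (100 * i + 100) = width := Nat.min_eq_left h
    have e2 : min width 1000 = width := Nat.min_eq_left (by omega)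
    rw [e1, e2]
  · next h =>
    simp only [List.length_map, List.length_range] at h
    by_cases hi : i = 9
    · subst hi
      have hnil : List.range' (9 + 1) (10 - (9 + 1)) = [] := by decide
      rw [hnil, pvHundredsLoop, Nat.min_eq_right (by omega : (1000 : Nat) ≤ width)]
    · have hrec := pvHundredsLoop_eq width (i + 1) (by omega) (by omega)
      have h100 : 100 * (i + 1) = 100 * i + 100 := by ring
      rw [h100] at hrec
      exact hrec
termination_by 10 - i
decreasing_by omega

lemma pvHundredsEntry (width : Nat) :
    pvHundredsLoop width [1, 2, 3, 4, 5, 6, 7, 8, 9] (List.replicate 100 ' ')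
      = (List.range (min width 1000)).map
          (fun x => if x < 100 then ' ' else pvDigit (x / 100)) := by
  have h1 : ([1, 2, 3, 4, 5, 6, 7, 8, 9] : List Nat) = List.range' 1 (10 - 1) := by decide
  have h2 : List.replicate 100 ' '
      = (List.range (100 * 1)).map (fun x => if x < 100 then ' ' else pvDigit (x / 100)) := by
    have hall : ∀ x ∈ List.range (100 * 1),
        (if x < 100 then ' ' else pvDigit (x / 100)) = ' ' := by
      intro x hx
      simp only [List.mem_range] at hx
      simp [hx]
    rw [List.map_congr_left hall, List.map_const', List.length_range]
  rw [h1, h2]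
  exact pvHundredsLoop_eq width 1 (le_refl 1) (by omega)

-- common canonical form both ports are rewritten to
def pvCanon (grid : List (List String)) : String :=
  let width := grid.foldl (fun m r => max m r.length) 0
  let lead := List.replicate 3 ' '
  let headers :=
    (if 100 < width then
       [lead ++ (List.range (min width 1000)).map
          (fun x => if x < 100 then ' ' else pvDigit (x / 100))] else [])
    ++ (if 10 < width then
       [lead ++ (List.range width).map
          (fun x => if x < 10 then ' ' else pvDigit (x / 10 % 10))] else [])
    ++ [lead ++ (List.range width).map (fun x => pvDigit (x % 10))]
  let body := (PySem.List.enumerate grid).map (fun p => pvRowLine width p.1 p.2)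
  String.ofList (List.intercalate ['\n'] (headers ++ body ++ headers.reverse))

lemma pvB_eq_canon (grid : List (List String)) :
    grid_str_with_edges_alt grid = pvCanon grid := by
  unfold grid_str_with_edges_alt pvCanon
  simp only []
  rw [pv_maxD_eq]

lemma pvA_width_eq (grid : List (List String)) :
    (PySem.List.pyRange 0 ((pvGetDimensions grid).2 : Int) 1).foldl
      (fun w i => if w < (PySem.List.pyGetD grid i []).length
                  then (PySem.List.pyGetD grid i []).length else w) (pvGetDimensions grid).1
      = grid.foldl (fun m r => max m r.length) 0 := by
  have h2 : (pvGetDimensions grid).2 = grid.length := rfl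
  have h1 : (pvGetDimensions grid).1
      = (PySem.List.pyRange 0 (grid.length : Int) 1).foldl
        (fun x i => if x < (PySem.List.pyGetD grid i []).length
                    then (PySem.List.pyGetD grid i []).length else x) 0 := rfl
  rw [h2, h1]
  rw [PySem.List.foldl_pyRange_zero_pyGetD' grid []
        (fun (x : Nat) (r : List String) => if x < r.length then r.length else x),
      PySem.List.foldl_pyRange_zero_pyGetD' grid []
        (fun (x : Nat) (r : List String) => if x < r.length then r.length else x)]
  rw [pv_if_max_eq]
  exact pv_foldl_max_fixed grid _ (PySem.List.le_foldl_max_nat grid (fun r => r.length) 0).2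

lemma pvHeaderLines_eq (w : Nat) :
    pvHeaderLines w
      = (if 100 < w then
           [List.replicate 3 ' ' ++ (List.range (min w 1000)).map
              (fun x => if x < 100 then ' ' else pvDigit (x / 100))] else [])
        ++ (if 10 < w then
           [List.replicate 3 ' ' ++ (List.range w).map
              (fun x => if x < 10 then ' ' else pvDigit (x / 10 % 10))] else [])
        ++ [List.replicate 3 ' ' ++ (List.range w).map (fun x => pvDigit (x % 10))] := by
  rw [pvHeaderLines, pvHundredsEntry, pvTensEntry]
  have hu : pvUnitsLoop w [] = (List.range w).map (fun x => pvDigit (x % 10)) := by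
    simpa using pvUnitsLoop_eq w 0
  rw [hu]
  split_ifs <;> simp

lemma pvA_eq_canon (grid : List (List String)) :
    grid_str_with_edges grid = pvCanon grid := by
  unfold grid_str_with_edges pvCanon
  simp only []
  rw [pvA_width_eq]
  have h2 : (pvGetDimensions grid).2 = grid.length := rfl
  rw [h2]
  rw [PySem.List.foldl_append_singleton_eq_map
        (fun y => pvRowLine (grid.foldl (fun m r => max m r.length) 0) y
          (PySem.List.pyGetD grid y []))]
  rw [pvHeaderLines_eq]
  rw [PySem.List.enumerate_eq_map_pyRange grid ([] : List String), List.map_map]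
  simp [Function.comp_def, List.append_assoc]

-- ===== VERDICT (by name: the statement is the Claim_ definition above) =====
theorem grid_str_with_edges_spec : Claim_equal_grid_str_with_edges := by
  intro grid _
  unfold Spec_grid_str_with_edges
  rw [pvA_eq_canon, pvB_eq_canon]
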